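-- pv_equiv track=rewrite | github.com/VinitMepani2712/IAM | analysis/dominator.py | compute_dominators
-- ===== SOURCE A (Python) =====
-- def compute_dominators(paths):
--     """
--     Given all escalation paths for a principal,
--     compute nodes that appear in every path.
--     """
--
--     if not paths:
--         return set()
--
--     # Convert each path to set of nodes (excluding source)
--     path_node_sets = [
--         set(path[1:-1])  # exclude source and capability
--         for path in paths
--     ]
--
--     # Intersection of all path node sets
--     dominators = set.intersection(*path_node_sets)
--
--     return dominators
-- ===== SOURCE B (Python) =====
-- def compute_dominators(paths):
--     """
--     Given all escalation paths for a principal,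
--     compute nodes that appear in every path.
--     """
--     if not paths:
--         return set()
--     counts = {}
--     for path in paths:
--         for node in set(path[1:-1]):
--             counts[node] = counts.get(node, 0) + 1
--     n = len(paths)
--     return {node for node, c in counts.items() if c == n}
-- ===== Notes on version B (the rewrite author's own statement) =====
-- stated objective: alternative
-- what changed: Replaces building a list of per-path sets and one big set.intersection with a single streaming frequency table (dict counter of per-path deduplicated nodes) followed by a threshold filter c == len(paths).
import Mathlib
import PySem

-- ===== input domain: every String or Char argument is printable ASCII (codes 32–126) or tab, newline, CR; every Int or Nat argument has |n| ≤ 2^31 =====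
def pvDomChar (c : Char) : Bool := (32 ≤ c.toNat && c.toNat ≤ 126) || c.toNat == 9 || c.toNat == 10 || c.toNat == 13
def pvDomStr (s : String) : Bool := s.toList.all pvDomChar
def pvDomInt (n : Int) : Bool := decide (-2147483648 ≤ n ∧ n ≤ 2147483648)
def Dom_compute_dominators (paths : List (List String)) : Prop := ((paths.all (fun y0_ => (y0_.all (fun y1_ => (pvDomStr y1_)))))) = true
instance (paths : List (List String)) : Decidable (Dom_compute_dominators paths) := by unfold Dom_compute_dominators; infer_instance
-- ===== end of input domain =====

-- B replaces the list of per-path sets + set.intersection with a streaming counter of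
-- per-path deduplicated nodes followed by a threshold filter (alternative decomposition, same cost).


-- ===== PORT A =====
def compute_dominators (paths : List (List String)) : List String :=
  if paths = [] then []
  else
    -- path_node_sets = [set(path[1:-1]) for path in paths]
    let pathNodeSets := paths.map (fun path => PySem.Set.ofList (PySem.List.slice path (some 1) (some (-1))))
    -- dominators = set.intersection(*path_node_sets)
    match pathNodeSets with
    | [] => []
    | s :: rest => rest.foldl (fun acc t => PySem.Set.inter acc t) s

-- ===== PORT B =====
def compute_dominators_alt (paths : List (List String)) : List String :=
  if paths = [] then []
  else
    -- counts[node] = counts.get(node, 0) + 1  over set(path[1:-1]) of each path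
    let counts := paths.foldl (fun d path =>
      (PySem.Set.ofList (PySem.List.slice path (some 1) (some (-1)))).foldl
        (fun d node => d.insert node (d.getD node 0 + 1)) d) PySem.Dict.empty
    let n : Int := paths.length
    -- {node for node, c in counts.items() if c == n}  (keys are already distinct)
    (counts.items.filter (fun kv => kv.2 == n)).map Prod.fst

-- ===== PRECONDITION & SPEC =====
def Spec_compute_dominators (paths : List (List String)) (out : List String) : Prop := out = compute_dominators_alt paths
instance (paths : List (List String)) (out : List String) : Decidable (Spec_compute_dominators paths out) := by unfold Spec_compute_dominators; infer_instance

-- ===== CLAIM (what is proved, stated in full; the proofs are below) =====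
def Claim_equal_compute_dominators : Prop := ∀ (paths : List (List String)), Dom_compute_dominators paths → Spec_compute_dominators paths (compute_dominators paths)

-- ===== LEMMAS AND PROOFS =====

-- set(path[1:-1])
def pvMid (path : List String) : PySem.Set String :=
  PySem.Set.ofList (PySem.List.slice path (some 1) (some (-1)))

theorem pvMid_nodup (path : List String) : (pvMid path).Nodup :=
  PySem.Set.nodup_ofList _

-- a nested per-element fold is one fold over the concatenation
theorem pv_foldl_flatMap {α β δ : Type} (l : List α) (f : α → List β) (g : δ → β → δ) (d : δ) :
    l.foldl (fun d x => (f x).foldl g d) d = (l.flatMap f).foldl g d := by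
  induction l generalizing d with
  | nil => rfl
  | cons p l ih => simp [List.flatMap_cons, List.foldl_append, ih]

-- the intersection fold is a filter by membership in every later set
theorem pv_foldl_inter (ts : List (List String)) (s : List String) :
    ts.foldl (fun a t => PySem.Set.inter a t) s
      = s.filter (fun x => ts.all (fun t => PySem.Set.contains t x)) := by
  induction ts generalizing s with
  | nil => simp
  | cons t ts ih =>
      show ts.foldl _ (PySem.Set.inter s t) = _
      rw [ih]
      show (s.filter (fun x => PySem.Set.contains t x)).filter _ = _
      rw [List.filter_filter]
      exact List.filter_congr (fun x _ => by simp [Bool.and_comm])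

theorem pv_count_flatMap_le {α : Type} (l : List α) (f : α → List String)
    (h : ∀ p, (f p).Nodup) (k : String) :
    (l.flatMap f).count k ≤ l.length := by
  induction l with
  | nil => simp
  | cons p l ih =>
      have h1 : (f p).count k ≤ 1 := List.nodup_iff_count_le_one.mp (h p) k
      simp only [List.flatMap_cons, List.count_append, List.length_cons]
      omega

theorem pv_count_flatMap_eq_iff {α : Type} (l : List α) (f : α → List String)
    (h : ∀ p, (f p).Nodup) (k : String) :
    (l.flatMap f).count k = l.length ↔ ∀ p ∈ l, k ∈ f p := by
  induction l with
  | nil => simp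
  | cons p l ih =>
      have h1 : (f p).count k ≤ 1 := List.nodup_iff_count_le_one.mp (h p) k
      have h2 : (l.flatMap f).count k ≤ l.length := pv_count_flatMap_le l f h k
      simp only [List.flatMap_cons, List.count_append, List.length_cons, List.mem_cons]
      constructor
      · intro hc
        have hp : (f p).count k = 1 := by omega
        have hrest : (l.flatMap f).count k = l.length := by omega
        have hk : k ∈ f p := List.count_pos_iff.mp (by omega)
        intro q hq
        rcases hq with rfl | hq
        · exact hk
        · exact (ih.mp hrest) q hq
      · intro hall
        have hk : k ∈ f p := hall p (Or.inl rfl)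
        have hp : (f p).count k = 1 := le_antisymm h1 (List.count_pos_iff.mpr hk)
        have hrest : (l.flatMap f).count k = l.length :=
          ih.mpr (fun q hq => hall q (Or.inr hq))
        omega

-- ===== VERDICT (by name: the statement is the Claim_ definition above) =====
theorem compute_dominators_spec : Claim_equal_compute_dominators := by
  intro paths _
  unfold Spec_compute_dominators compute_dominators compute_dominators_alt
  cases paths with
  | nil => simp
  | cons p rest =>
      simp only [if_neg (List.cons_ne_nil p rest), List.map_cons,
        show ∀ path, PySem.Set.ofList (PySem.List.slice path (some 1) (some (-1))) = pvMid path
          from fun _ => rfl]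
      rw [pv_foldl_flatMap (p :: rest) pvMid
            (fun (d : PySem.Dict String Int) (node : String) =>
              d.insert node (d.getD node 0 + 1)) PySem.Dict.empty,
          PySem.Dict.foldl_insert_getD_add_one_eq_counter,
          PySem.Dict.items_counter, List.filter_map, List.map_map]
      rw [pv_foldl_inter]
      set X := (p :: rest).flatMap pvMid with hX
      have hXeq : X = pvMid p ++ rest.flatMap pvMid := by simp [hX]
      have hofX : PySem.Set.ofList X
          = pvMid p ++ (PySem.Set.ofList (rest.flatMap pvMid)).filter
              (fun y => !(PySem.Set.contains (pvMid p) y)) := by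
        rw [hXeq, PySem.Set.ofList_append,
            PySem.Set.ofList_eq_self_of_nodup _ (pvMid_nodup p),
            PySem.Set.update_eq_append_filter]
      have hcomp : (Prod.fst ∘ fun k => (k, (X.count k : Int))) = id := rfl
      rw [hcomp, List.map_id, hofX, List.filter_append]
      have hQiff : ∀ k : String,
          ((fun kv : String × Int => kv.2 == ((p :: rest).length : Int)) ∘
            fun k => (k, (X.count k : Int))) k = true ↔ X.count k = rest.length + 1 := by
        intro k
        simp [Function.comp, List.length_cons]
        omega
      have hnil : (List.filter
          ((fun kv : String × Int => kv.2 == ((p :: rest).length : Int)) ∘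
            fun k => (k, (X.count k : Int)))
          ((PySem.Set.ofList (rest.flatMap pvMid)).filter
            (fun y => !(PySem.Set.contains (pvMid p) y)))) = [] := by
        rw [List.filter_eq_nil_iff]
        intro a ha
        have hmem := List.mem_filter.mp ha
        have hnot : a ∉ pvMid p := by
          have := hmem.2
          simpa [PySem.Set.contains_iff] using this
        have hc0 : (pvMid p).count a = 0 := List.count_eq_zero.mpr hnot
        have hle : (rest.flatMap pvMid).count a ≤ rest.length :=
          pv_count_flatMap_le rest pvMid (fun q => pvMid_nodup q) a
        intro hq
        have := (hQiff a).mp hq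
        rw [hXeq, List.count_append, hc0] at this
        omega
      rw [hnil, List.append_nil]
      apply List.filter_congr
      intro x hx
      rw [Bool.eq_iff_iff]
      have hc1 : (pvMid p).count x = 1 :=
        le_antisymm (List.nodup_iff_count_le_one.mp (pvMid_nodup p) x)
          (List.count_pos_iff.mpr hx)
      rw [hQiff x, hXeq, List.count_append, hc1]
      have := pv_count_flatMap_eq_iff rest pvMid (fun q => pvMid_nodup q) x
      constructor
      · intro hall
        have : ∀ q ∈ rest, x ∈ pvMid q := by
          intro q hq
          have := List.all_eq_true.mp hall (pvMid q) (List.mem_map_of_mem hq)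
          simpa [PySem.Set.contains_iff] using this
        have hcnt := (pv_count_flatMap_eq_iff rest pvMid (fun q => pvMid_nodup q) x).mpr this
        omega
      · intro hcnt
        have hcnt' : (rest.flatMap pvMid).count x = rest.length := by omega
        have hmemall := (pv_count_flatMap_eq_iff rest pvMid (fun q => pvMid_nodup q) x).mp hcnt'
        refine List.all_eq_true.mpr ?_
        intro t ht
        rcases List.mem_map.mp ht with ⟨q, hq, rfl⟩
        simpa [PySem.Set.contains_iff] using hmemall q hq
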